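-- pv_equiv track=rewrite | github.com/koba925/alds | atcoder/ABC104/B.py | accepted
-- ===== SOURCE A (Python) =====
-- def accepted(S):
--     count = 0
--
--     for i, c in enumerate(S):
--         if i == 0:
--             if c != "A":
--                 return False
--         elif 2 <= i < len(S) - 1 and c == "C":
--             count += 1
--         elif not c.islower():
--             return False
--
--     return count == 1
-- ===== SOURCE B (Python) =====
-- def accepted(S):
--     if len(S) < 4 or S[0] != 'A':
--         return False
--     mid = S[2:-1]
--     if mid.count('C') != 1:
--         return False
--     if not (S[1].islower() and S[-1].islower()):
--         return False
--     return all(c == 'C' or c.islower() for c in mid)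
-- ===== Notes on version B (the rewrite author's own statement) =====
-- stated objective: simpler
-- what changed: A's single indexed enumerate-loop with a running count and early returns is replaced by guard checks, a one-call count over the middle slice S[2:-1], and separate lowercase validation of the endpoints and of the middle region.
import Mathlib
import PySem

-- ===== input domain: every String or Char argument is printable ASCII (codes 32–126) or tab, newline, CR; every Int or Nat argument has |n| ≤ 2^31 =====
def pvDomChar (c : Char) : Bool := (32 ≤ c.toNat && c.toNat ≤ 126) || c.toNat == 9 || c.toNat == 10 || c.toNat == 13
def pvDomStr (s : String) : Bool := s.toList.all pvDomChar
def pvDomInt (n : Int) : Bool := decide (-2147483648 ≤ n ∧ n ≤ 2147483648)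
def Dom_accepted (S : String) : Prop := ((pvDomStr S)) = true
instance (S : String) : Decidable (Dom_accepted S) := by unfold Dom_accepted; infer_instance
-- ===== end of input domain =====

-- B replaces A's single indexed loop with guards + a count over the S[2:-1] region
-- plus separate endpoint/middle lowercase checks (objective: simpler decomposition, same cost).

-- ===== PORT A =====
-- the 'for i, c in enumerate(S)' loop with its early returns and the running count
def acceptedGo (n : Nat) : List (Int × Char) → Int → Bool
  | [], count => count == 1
  | (i, c) :: rest, count =>
    if i == 0 then
      if c != 'A' then false else acceptedGo n rest count
    else if 2 ≤ i ∧ i < (n : Int) - 1 ∧ c == 'C' then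
      acceptedGo n rest (count + 1)
    else if !(PySem.Chars.islower c) then false
    else acceptedGo n rest count

def accepted (S : String) : Bool :=
  acceptedGo S.toList.length (PySem.List.enumerate S.toList 0) 0

-- ===== PORT B =====
def accepted_alt (S : String) : Bool :=
  let l := S.toList
  if l.length < 4 || PySem.List.pyGetD l 0 'A' != 'A' then false
  else
    let mid := PySem.List.slice l (some 2) (some (-1))
    if mid.count 'C' != 1 then false
    else if !(PySem.Chars.islower (PySem.List.pyGetD l 1 'A')
              && PySem.Chars.islower (PySem.List.pyGetD l (-1) 'A')) then false
    else mid.all (fun c => c == 'C' || PySem.Chars.islower c)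

-- ===== PRECONDITION & SPEC =====
def Spec_accepted (S : String) (out : Bool) : Prop := out = accepted_alt S
instance (S : String) (out : Bool) : Decidable (Spec_accepted S out) := by unfold Spec_accepted; infer_instance

-- ===== CLAIM (what is proved, stated in full; the proofs are below) =====
def Claim_equal_accepted : Prop := ∀ (S : String), Dom_accepted S → Spec_accepted S (accepted S)

-- ===== LEMMAS AND PROOFS =====

-- the loop over the middle region (indices j … n-2) and the final element (index n-1)
theorem acceptedGo_mid (n : Nat) (m : List Char) (e : Char) (j count : Int)
    (h2 : 2 ≤ j) (hend : j + m.length = (n : Int) - 1) :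
    acceptedGo n (PySem.List.enumerate (m ++ [e]) j) count =
      (m.all (fun c => c == 'C' || PySem.Chars.islower c)
        && PySem.Chars.islower e
        && (count + (m.count 'C' : Int) == 1)) := by
  induction m generalizing j count with
  | nil =>
    simp only [List.nil_append, PySem.List.enumerate_cons, PySem.List.enumerate_nil]
    rw [acceptedGo]
    have h0 : (j == 0) = false := by simp; omega
    have hc : ¬ (2 ≤ j ∧ j < (n : Int) - 1 ∧ (e == 'C') = true) := by
      rintro ⟨_, h, _⟩; simp at hend; omega
    simp only [h0, if_neg hc, Bool.false_eq_true, if_false]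
    cases PySem.Chars.islower e <;> simp [acceptedGo]
  | cons c m' ih =>
    simp only [List.cons_append, PySem.List.enumerate_cons]
    rw [acceptedGo]
    have h0 : (j == 0) = false := by simp; omega
    have hlt : j < (n : Int) - 1 := by
      have := hend; simp only [List.length_cons] at this; push_cast at this; omega
    have hend' : j + 1 + (m'.length : Int) = (n : Int) - 1 := by
      have := hend; simp only [List.length_cons] at this; push_cast at this ⊢; omega
    simp only [h0, Bool.false_eq_true, if_false]
    by_cases hC : c = 'C'
    · subst hC
      rw [if_pos ⟨h2, hlt, by simp⟩, ih (j + 1) (count + 1) (by omega) hend',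
        show count + 1 + ((m'.count 'C' : Nat) : Int) = count + (((m'.count 'C' : Nat) : Int) + 1) from by ring]
      simp
    · have hnc : ¬ (2 ≤ j ∧ j < (n : Int) - 1 ∧ (c == 'C') = true) := by
        rintro ⟨_, _, h⟩; exact hC (by simpa using h)
      rw [if_neg hnc]
      cases hlow : PySem.Chars.islower c
      · simp [hlow, hC]
      · rw [if_neg (by simp [hlow]), ih (j + 1) count (by omega) hend']
        simp [hlow, hC]

-- both programs on a string of length ≥ 4, decomposed as a :: b :: m ++ [e]
theorem main_long (a b e : Char) (m : List Char) (hm : 1 ≤ m.length) :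
    acceptedGo (m.length + 3) (PySem.List.enumerate (a :: b :: (m ++ [e])) 0) 0 =
      accepted_alt (String.ofList (a :: b :: (m ++ [e]))) := by
  rw [PySem.List.enumerate_cons, PySem.List.enumerate_cons]
  rw [acceptedGo]
  have hlen : (a :: b :: (m ++ [e])).length = m.length + 3 := by simp
  have hslice : PySem.List.slice (a :: b :: (m ++ [e])) (some 2) (some (-1)) = m := by
    simp only [PySem.List.slice, PySem.List.clampIdx_neg_one, hlen]
    have hc2 : PySem.List.clampIdx (m.length + 3) 2 = 2 := by
      simp [PySem.List.clampIdx]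
    rw [hc2, show m.length + 3 - 1 - 2 = m.length by omega]
    simpa using List.take_left (l₁ := m) (l₂ := [e])
  have hlast : PySem.List.pyGetD (a :: b :: (m ++ [e])) (-1) 'A' = e := by
    simpa using PySem.List.pyGetD_neg_one_append_singleton (a :: b :: m) e 'A'
  by_cases hA : a = 'A'
  · subst hA
    rw [if_pos (by simp), if_neg (by simp)]
    rw [acceptedGo]
    have hc1 : ¬ (2 ≤ (0 + 1 : Int) ∧ (0 + 1 : Int) < ((m.length + 3 : Nat) : Int) - 1 ∧ (b == 'C') = true) := by
      rintro ⟨h, _, _⟩; omega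
    rw [show ((0 + 1 : Int) == 0) = false by decide]
    simp only [Bool.false_eq_true, if_false, if_neg hc1]
    rw [acceptedGo_mid (m.length + 3) m e (0 + 1 + 1) 0 (by omega) (by push_cast; omega)]
    have hguard : ¬ (decide ((String.ofList ('A' :: b :: (m ++ [e]))).toList.length < 4)
        || ((PySem.List.pyGetD (String.ofList ('A' :: b :: (m ++ [e]))).toList 0 'A') != 'A')) = true := by
      simp [String.toList_ofList, PySem.List.pyGetD_zero_cons]
      omega
    have hg1 : PySem.List.pyGetD ('A' :: b :: (m ++ [e])) 1 'A' = b := by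
      simpa using PySem.List.pyGetD_ofNat (xs := 'A' :: b :: (m ++ [e])) (n := 1) (d := 'A') (by simp)
    cases hlow : PySem.Chars.islower b
    · rw [if_pos (by simp [hlow])]
      simp only [accepted_alt, String.toList_ofList, hslice, hlast, hg1]
      rw [if_neg (by simpa using hguard)]
      split
      · rfl
      · rw [if_pos (by simp [hlow])]
    · rw [if_neg (by simp [hlow])]
      simp only [accepted_alt, String.toList_ofList, hslice, hlast, hg1]
      rw [if_neg (by simpa using hguard)]
      cases hcnt : (m.count 'C' == 1) <;>
        cases hall : m.all (fun c => c == 'C' || PySem.Chars.islower c) <;>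
        cases hle : PySem.Chars.islower e <;>
        simp_all
  · rw [if_pos (by simp), if_pos (by simpa using hA)]
    simp only [accepted_alt, String.toList_ofList, PySem.List.pyGetD_zero_cons]
    rw [if_pos (by simp [hA])]

-- ===== VERDICT (by name: the statement is the Claim_ definition above) =====
theorem accepted_spec : Claim_equal_accepted := by
  intro S _
  unfold Spec_accepted
  match hS : S.toList with
  | [] =>
    have halt : accepted_alt S = false := by unfold accepted_alt; rw [hS]; rfl
    rw [halt]
    simp [accepted, hS, PySem.List.enumerate_nil, acceptedGo]
  | [a] =>
    have halt : accepted_alt S = false := by unfold accepted_alt; rw [hS]; rfl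
    rw [halt]
    simp [accepted, hS, PySem.List.enumerate_cons, PySem.List.enumerate_nil, acceptedGo]
  | [a, b] =>
    have halt : accepted_alt S = false := by unfold accepted_alt; rw [hS]; rfl
    rw [halt]
    simp [accepted, hS, PySem.List.enumerate_cons, PySem.List.enumerate_nil, acceptedGo]
  | [a, b, c] =>
    have halt : accepted_alt S = false := by unfold accepted_alt; rw [hS]; rfl
    rw [halt]
    simp [accepted, hS, PySem.List.enumerate_cons, PySem.List.enumerate_nil, acceptedGo]
  | a :: b :: c :: d :: rest =>
    have hne : (c :: d :: rest) ≠ [] := by simp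
    obtain ⟨m, e, hm, hme⟩ : ∃ m e, 1 ≤ m.length ∧ c :: d :: rest = m ++ [e] :=
      ⟨(c :: d :: rest).dropLast, (c :: d :: rest).getLast hne, by simp,
        (List.dropLast_append_getLast hne).symm⟩
    have hl : S.toList = a :: b :: (m ++ [e]) := by rw [hS, hme]
    have hacc : accepted S =
        acceptedGo (m.length + 3) (PySem.List.enumerate (a :: b :: (m ++ [e])) 0) 0 := by
      unfold accepted
      rw [hl]
      congr 1
      simp
    rw [hacc, main_long a b e m hm]
    unfold accepted_alt
    rw [String.toList_ofList, hl]
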